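-- pv_equiv track=rewrite | github.com/agamkapur/web-crawler | src/utils/url_verifier.py | is_valid_path_query
-- ===== SOURCE A (Python) =====
-- def is_valid_path_query(path: str, query: str) -> bool:
--     """Validate path and query string characters."""
--     # Check for potentially dangerous characters
--     dangerous_chars = [
--         "<",
--         ">",
--         '"',
--         "'",
--         "\\",
--         "\x00",
--         "\x01",
--         "\x02",
--         "\x03",
--         "\x04",
--         "\x05",
--         "\x06",
--         "\x07",
--     ]
--
--     for char in dangerous_chars:
--         if char in path or char in query:
--             return False
--
--     return True
-- ===== SOURCE B (Python) =====
-- def is_valid_path_query(path: str, query: str) -> bool: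
--     """Validate path and query string characters."""
--     bad = {"<", ">", '"', "'", "\\",
--            "\x00", "\x01", "\x02", "\x03", "\x04", "\x05", "\x06", "\x07"}
--     return all(c not in bad for c in path) and all(c not in bad for c in query)
-- ===== Notes on version B (the rewrite author's own statement) =====
-- stated objective: simpler
-- what changed: B builds the set of 13 dangerous characters once and makes one membership pass over each input string, instead of A's 13 substring scans of both strings.
import Mathlib
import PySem

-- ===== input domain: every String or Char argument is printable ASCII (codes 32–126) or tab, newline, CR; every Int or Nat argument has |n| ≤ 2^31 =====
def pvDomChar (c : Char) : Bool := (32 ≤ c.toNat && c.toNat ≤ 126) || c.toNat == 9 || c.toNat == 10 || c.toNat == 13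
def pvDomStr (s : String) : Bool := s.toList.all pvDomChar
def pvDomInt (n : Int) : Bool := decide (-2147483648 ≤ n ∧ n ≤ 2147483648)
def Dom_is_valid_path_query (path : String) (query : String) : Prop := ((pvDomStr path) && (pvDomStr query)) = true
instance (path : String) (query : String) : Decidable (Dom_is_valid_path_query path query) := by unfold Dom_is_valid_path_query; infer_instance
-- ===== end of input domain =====

-- B builds the set of dangerous characters once and scans each input string in one membership pass,
-- instead of A's 13 substring scans; objective: simpler (one pass over the data).


-- ===== PORT A =====
-- the literal list of dangerous one-character strings, in A's order
def pvDangerousA : List String :=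
  ["<", ">", "\"", "'", "\\", "\u0000", "\u0001", "\u0002", "\u0003",
   "\u0004", "\u0005", "\u0006", "\u0007"]

-- A's loop: for char in dangerous_chars: if char in path or char in query: return False
def pvLoopA : List String → String → String → Bool
  | [], _, _ => true
  | ch :: rest, path, query =>
      if PySem.Str.isIn ch path || PySem.Str.isIn ch query then false
      else pvLoopA rest path query

def is_valid_path_query (path : String) (query : String) : Bool :=
  pvLoopA pvDangerousA path query

-- ===== PORT B =====
-- bad = {...} : the set of dangerous characters, built once
def pvBadB : PySem.Set Char :=
  PySem.Set.ofList ['<', '>', '"', '\'', '\\', '\u0000', '\u0001', '\u0002',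
                    '\u0003', '\u0004', '\u0005', '\u0006', '\u0007']

def is_valid_path_query_alt (path : String) (query : String) : Bool :=
  (path.toList.all (fun c => !(PySem.Set.contains pvBadB c))) &&
  (query.toList.all (fun c => !(PySem.Set.contains pvBadB c)))

-- ===== PRECONDITION & SPEC =====
def Spec_is_valid_path_query (path : String) (query : String) (out : Bool) : Prop := out = is_valid_path_query_alt path query
instance (path : String) (query : String) (out : Bool) : Decidable (Spec_is_valid_path_query path query out) := by unfold Spec_is_valid_path_query; infer_instance

-- ===== CLAIM (what is proved, stated in full; the proofs are below) =====
def Claim_equal_is_valid_path_query : Prop := ∀ (path : String) (query : String), Dom_is_valid_path_query path query → Spec_is_valid_path_query path query (is_valid_path_query path query)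

-- ===== LEMMAS AND PROOFS =====

-- A's early-return loop is the conjunction over the dangerous list
theorem pvLoopA_eq_all (cs : List String) (p q : String) :
    pvLoopA cs p q = cs.all (fun ch => !(PySem.Str.isIn ch p || PySem.Str.isIn ch q)) := by
  induction cs with
  | nil => rfl
  | cons c rest ih =>
      by_cases h : (PySem.Str.isIn c p || PySem.Str.isIn c q) = true
      · rw [pvLoopA, if_pos h]
        simp only [PySem.Str.isIn_eq, Bool.or_eq_true] at h
        simp only [List.all_cons]
        rcases h with h | h <;> simp [h]
      · rw [pvLoopA, if_neg h, ih]
        rw [Bool.not_eq_true] at h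
        simp only [PySem.Str.isIn_eq, Bool.or_eq_false_iff] at h
        simp only [List.all_cons]
        simp [h.1, h.2]

-- 'c' (one character) is a substring of s iff c is among s's characters
theorem pvIsIn_singleton (c : Char) (s : String) :
    PySem.Str.isIn (String.ofList [c]) s = s.toList.contains c := by
  have hmk : (String.ofList [c]).toList = [c] := by simp
  rcases h : s.toList.contains c with _ | _
  · rw [Bool.eq_false_iff]
    intro hIn
    rw [PySem.Str.isIn_iff_infix, hmk] at hIn
    have hc : c ∈ s.toList := hIn.sublist.subset (by simp)
    simp_all
  · rw [PySem.Str.isIn_iff_infix, hmk]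
    have hc : c ∈ s.toList := by simpa using h
    obtain ⟨l, r, hlr⟩ := List.append_of_mem hc
    exact ⟨l, r, by simp [hlr]⟩

-- ===== VERDICT (by name: the statement is the Claim_ definition above) =====
theorem is_valid_path_query_spec : Claim_equal_is_valid_path_query := by
  intro path query _
  unfold Spec_is_valid_path_query is_valid_path_query is_valid_path_query_alt
  rw [pvLoopA_eq_all]
  have hD : pvDangerousA = pvBadB.map (fun c => String.ofList [c]) := by decide
  rw [hD, List.all_map]
  simp only [Function.comp_def, pvIsIn_singleton]
  apply Bool.eq_iff_iff.mpr
  simp only [List.all_eq_true, Bool.not_eq_true', Bool.or_eq_false_iff, Bool.and_eq_true,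
    List.contains_eq_mem, decide_eq_false_iff_not, PySem.Set.contains]
  constructor
  · intro h
    exact ⟨fun c hc hb => ((h c hb).1 hc), fun c hc hb => ((h c hb).2 hc)⟩
  · intro ⟨h1, h2⟩ c hb
    exact ⟨fun hc => h1 c hc hb, fun hc => h2 c hc hb⟩
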